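-- pv_equiv track=rewrite | github.com/g-jp/projects | Bioq_exp_III/geneddit/geneddit.py | prot_cod
-- ===== SOURCE A (Python) =====
-- complementRNA = { 'A':'U', 'T':'A', 'G':'C', 'C':'G'}
--
-- gencode = {'UUU': 'F', 'UUC': 'F', 'UUA': 'L', 'UUG': 'L', 'UCU': 'S',
--      'UCC': 'S', 'UCA': 'S', 'UCG': 'S', 'UAU': 'Y', 'UAC': 'Y',
--      'UGU': 'C', 'UGC': 'C', 'UGG': 'W', 'CUU': 'L', 'CUC': 'L',
--      'CUA': 'L', 'CUG': 'L', 'CCU': 'P', 'CCC': 'P', 'CCA': 'P',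
--      'CCG': 'P', 'CAU': 'H', 'CAC': 'H', 'CAA': 'Q', 'CAG': 'Q',
--      'CGU': 'R', 'CGC': 'R', 'CGA': 'R', 'CGG': 'R', 'AUU': 'I',
--      'AUC': 'I', 'AUA': 'I', 'AUG': 'M', 'ACU': 'T', 'ACC': 'T',
--      'ACA': 'T', 'ACG': 'T', 'AAU': 'N', 'AAC': 'N', 'AAA': 'K',
--      'AAG': 'K', 'AGU': 'S', 'AGC': 'S', 'AGA': 'R', 'AGG': 'R',
--      'GUU': 'V', 'GUC': 'V', 'GUA': 'V', 'GUG': 'V', 'GCU': 'A',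
--      'GCC': 'A', 'GCA': 'A', 'GCG': 'A', 'GAU': 'D', 'GAC': 'D',
--      'GAA': 'E', 'GAG': 'E', 'GGU': 'G', 'GGC': 'G', 'GGA': 'G',
--      'GGG': 'G', 'UAA': 'STOP', 'UAG': 'STOP', 'UGA': 'STOP'}
--
-- def prot_cod(seq): #From the noncoding chain it produces the associated protein
--     mRNA = []
--     for n in seq:
--         mRNA.append(complementRNA[n])
--     mRNA = ''.join(mRNA)
--
--     protein = []
--     cod = [mRNA[i] + mRNA[i+1] + mRNA[i+2] for i in range(0, len(mRNA), 3)]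
--     for n in cod:
--         protein.append(gencode[n])
--     protein = '-'.join(protein)
--     return protein
-- ===== SOURCE B (Python) =====
-- # B: arithmetic codon indexing. Each DNA base maps to the 2-bit digit of its RNA
-- # complement in UCAG order (A->U->0, G->C->1, T->A->2, C->G->3); a codon becomes
-- # a number 0..63 indexing a flat amino-acid table. No string dictionaries.
--
-- _DIG = {'A': 0, 'G': 1, 'T': 2, 'C': 3}
--
-- _AA = ['F', 'F', 'L', 'L', 'S', 'S', 'S', 'S', 'Y', 'Y', 'STOP', 'STOP',
--        'C', 'C', 'STOP', 'W',
--        'L', 'L', 'L', 'L', 'P', 'P', 'P', 'P', 'H', 'H', 'Q', 'Q',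
--        'R', 'R', 'R', 'R',
--        'I', 'I', 'I', 'M', 'T', 'T', 'T', 'T', 'N', 'N', 'K', 'K',
--        'S', 'S', 'R', 'R',
--        'V', 'V', 'V', 'V', 'A', 'A', 'A', 'A', 'D', 'D', 'E', 'E',
--        'G', 'G', 'G', 'G']
--
--
-- def prot_cod(seq):
--     protein = []
--     for i in range(0, len(seq), 3):
--         idx = 16 * _DIG[seq[i]] + 4 * _DIG[seq[i + 1]] + _DIG[seq[i + 2]]
--         protein.append(_AA[idx])
--     return '-'.join(protein)
-- ===== Notes on version B (the rewrite author's own statement) =====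
-- stated objective: alternative
-- what changed: B replaces A's three passes and both string dictionaries with a single loop that encodes each DNA base as a 2-bit digit of its RNA complement (UCAG order) and translates each codon by arithmetic indexing (16*d1+4*d2+d3) into a flat 64-entry amino-acid table, with no intermediate mRNA string or codon list.
import Mathlib
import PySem

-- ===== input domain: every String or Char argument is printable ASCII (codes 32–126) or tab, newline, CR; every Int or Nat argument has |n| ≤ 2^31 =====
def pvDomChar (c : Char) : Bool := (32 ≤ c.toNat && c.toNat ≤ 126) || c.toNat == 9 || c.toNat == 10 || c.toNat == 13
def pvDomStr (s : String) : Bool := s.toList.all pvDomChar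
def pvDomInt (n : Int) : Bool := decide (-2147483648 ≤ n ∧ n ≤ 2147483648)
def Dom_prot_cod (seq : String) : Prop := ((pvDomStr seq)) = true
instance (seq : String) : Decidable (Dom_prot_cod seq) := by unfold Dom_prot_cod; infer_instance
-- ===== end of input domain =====

-- B replaces A's dict-based three-pass translation by one loop with arithmetic codon
-- indexing into a flat 64-entry table; same return value wherever the Python A returns.

-- ===== PORT A =====
-- complementRNA[c]; none = Python KeyError
def complRNA (c : Char) : Option Char :=
  match c with
  | 'A' => some 'U' | 'T' => some 'A' | 'G' => some 'C' | 'C' => some 'G'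
  | _ => none

-- gencode[s]; none = Python KeyError
def gencode (s : String) : Option String :=
  match s with
  | "UUU" => some "F" | "UUC" => some "F" | "UUA" => some "L" | "UUG" => some "L"
  | "UCU" => some "S" | "UCC" => some "S" | "UCA" => some "S" | "UCG" => some "S"
  | "UAU" => some "Y" | "UAC" => some "Y" | "UGU" => some "C" | "UGC" => some "C"
  | "UGG" => some "W" | "CUU" => some "L" | "CUC" => some "L" | "CUA" => some "L"
  | "CUG" => some "L" | "CCU" => some "P" | "CCC" => some "P" | "CCA" => some "P"
  | "CCG" => some "P" | "CAU" => some "H" | "CAC" => some "H" | "CAA" => some "Q"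
  | "CAG" => some "Q" | "CGU" => some "R" | "CGC" => some "R" | "CGA" => some "R"
  | "CGG" => some "R" | "AUU" => some "I" | "AUC" => some "I" | "AUA" => some "I"
  | "AUG" => some "M" | "ACU" => some "T" | "ACC" => some "T" | "ACA" => some "T"
  | "ACG" => some "T" | "AAU" => some "N" | "AAC" => some "N" | "AAA" => some "K"
  | "AAG" => some "K" | "AGU" => some "S" | "AGC" => some "S" | "AGA" => some "R"
  | "AGG" => some "R" | "GUU" => some "V" | "GUC" => some "V" | "GUA" => some "V"
  | "GUG" => some "V" | "GCU" => some "A" | "GCC" => some "A" | "GCA" => some "A"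
  | "GCG" => some "A" | "GAU" => some "D" | "GAC" => some "D" | "GAA" => some "E"
  | "GAG" => some "E" | "GGU" => some "G" | "GGC" => some "G" | "GGA" => some "G"
  | "GGG" => some "G" | "UAA" => some "STOP" | "UAG" => some "STOP" | "UGA" => some "STOP"
  | _ => none

-- A's pass 1: 'for n in seq: mRNA.append(complementRNA[n])'
def mapCompl : List Char → Option (List Char)
  | [] => some []
  | c :: r =>
    match complRNA c, mapCompl r with
    | some x, some xs => some (x :: xs)
    | _, _ => none

-- A's pass 2: '[mRNA[i]+mRNA[i+1]+mRNA[i+2] for i in range(0,len(mRNA),3)]';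
-- none = IndexError on a trailing chunk of length 1 or 2
def codonsA : List Char → Option (List String)
  | [] => some []
  | a :: b :: c :: r =>
    match codonsA r with
    | some cs => some (String.ofList [a, b, c] :: cs)
    | none => none
  | _ => none

-- A's pass 3: 'for n in cod: protein.append(gencode[n])'
def mapCode : List String → Option (List String)
  | [] => some []
  | s :: r =>
    match gencode s, mapCode r with
    | some p, some ps => some (p :: ps)
    | _, _ => none

def prot_cod (seq : String) : String :=
  match mapCompl seq.toList with
  | none => ""            -- Python raises KeyError here; excluded by Pre_
  | some mRNA =>
    match codonsA mRNA with
    | none => ""          -- Python raises IndexError here; excluded by Pre_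
    | some cod =>
      match mapCode cod with
      | none => ""        -- Python raises KeyError here; excluded by Pre_
      | some protein => PySem.Str.join "-" protein

-- ===== PORT B =====
-- _DIG[c]: the 2-bit digit of c's RNA complement in UCAG order; none = KeyError
def dig (c : Char) : Option Nat :=
  match c with
  | 'A' => some 0 | 'G' => some 1 | 'T' => some 2 | 'C' => some 3
  | _ => none

-- _AA: flat 64-entry amino-acid table, indexed by 16*d1+4*d2+d3
def aaTable : List String :=
  ["F", "F", "L", "L", "S", "S", "S", "S", "Y", "Y", "STOP", "STOP",
   "C", "C", "STOP", "W",
   "L", "L", "L", "L", "P", "P", "P", "P", "H", "H", "Q", "Q",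
   "R", "R", "R", "R",
   "I", "I", "I", "M", "T", "T", "T", "T", "N", "N", "K", "K",
   "S", "S", "R", "R",
   "V", "V", "V", "V", "A", "A", "A", "A", "D", "D", "E", "E",
   "G", "G", "G", "G"]

-- B's single loop: 'for i in range(0, len(seq), 3): idx = 16*_DIG[..]+4*_DIG[..]+_DIG[..]'
def fusedB : List Char → Option (List String)
  | [] => some []
  | a :: b :: c :: r =>
    match dig a, dig b, dig c with
    | some x, some y, some z =>
      match fusedB r with
      | some ps => some (aaTable.getD (16 * x + 4 * y + z) "" :: ps)
      | none => none
    | _, _, _ => none     -- Python raises KeyError here; excluded by Pre_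
  | _ => none             -- Python raises IndexError here; excluded by Pre_

def prot_cod_alt (seq : String) : String :=
  match fusedB seq.toList with
  | none => ""            -- Python raises here; excluded by Pre_
  | some protein => PySem.Str.join "-" protein

-- ===== PRECONDITION & SPEC =====
-- Pre_ = exactly the inputs where the Python A returns: every base is A/T/G/C
-- (else KeyError) and the length is a multiple of 3 (else IndexError on the last codon).
def Pre_prot_cod (seq : String) : Prop :=
  seq.toList.all (fun c => c == 'A' || c == 'T' || c == 'G' || c == 'C') = true ∧
  seq.toList.length % 3 = 0
instance (seq : String) : Decidable (Pre_prot_cod seq) := by unfold Pre_prot_cod; infer_instance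
def pvWitness_prot_cod : String := "TACGGGATT"

def Spec_prot_cod (seq : String) (out : String) : Prop := out = prot_cod_alt seq
instance (seq : String) (out : String) : Decidable (Spec_prot_cod seq out) := by unfold Spec_prot_cod; infer_instance

-- ===== CLAIM =====
def Claim_equal_prot_cod : Prop := ∀ (seq : String), Dom_prot_cod seq → Pre_prot_cod seq → Spec_prot_cod seq (prot_cod seq)

-- ===== LEMMAS AND PROOFS =====

-- A's staged Option pipeline, as one term
def pipeA (l : List Char) : Option (List String) :=
  (mapCompl l).bind fun m => (codonsA m).bind mapCode

-- complRNA succeeds exactly where dig does, and dig is the UCAG digit of the complement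
theorem dig_none_iff (a : Char) : dig a = none ↔ complRNA a = none := by
  unfold dig complRNA
  split <;> simp_all

-- complement outputs together with their digits: the 4 possible (input, output, digit) rows
theorem compl_dig (a x : Char) (h : complRNA a = some x) :
    ∃ d, dig a = some d ∧
      ((x = 'U' ∧ d = 0) ∨ (x = 'C' ∧ d = 1) ∨ (x = 'A' ∧ d = 2) ∨ (x = 'G' ∧ d = 3)) := by
  unfold complRNA at h
  split at h <;> simp_all [dig, eq_comm]

-- translating a codon of complement outputs = arithmetic lookup in aaTable
theorem gencode_table (x y z : Char) (dx dy dz : Nat)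
    (hx : (x = 'U' ∧ dx = 0) ∨ (x = 'C' ∧ dx = 1) ∨ (x = 'A' ∧ dx = 2) ∨ (x = 'G' ∧ dx = 3))
    (hy : (y = 'U' ∧ dy = 0) ∨ (y = 'C' ∧ dy = 1) ∨ (y = 'A' ∧ dy = 2) ∨ (y = 'G' ∧ dy = 3))
    (hz : (z = 'U' ∧ dz = 0) ∨ (z = 'C' ∧ dz = 1) ∨ (z = 'A' ∧ dz = 2) ∨ (z = 'G' ∧ dz = 3)) :
    gencode (String.ofList [x, y, z]) = some (aaTable.getD (16 * dx + 4 * dy + dz) "") := by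
  rcases hx with ⟨rfl, rfl⟩ | ⟨rfl, rfl⟩ | ⟨rfl, rfl⟩ | ⟨rfl, rfl⟩ <;>
    rcases hy with ⟨rfl, rfl⟩ | ⟨rfl, rfl⟩ | ⟨rfl, rfl⟩ | ⟨rfl, rfl⟩ <;>
    rcases hz with ⟨rfl, rfl⟩ | ⟨rfl, rfl⟩ | ⟨rfl, rfl⟩ | ⟨rfl, rfl⟩ <;> decide

-- B's fused arithmetic loop computes exactly A's staged pipeline (even on failing inputs)
theorem pipeA_eq_fusedB : ∀ l, pipeA l = fusedB l
  | [] => rfl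
  | [a] => by
      simp only [pipeA, mapCompl, fusedB]
      cases ha : complRNA a <;> simp [codonsA]
  | [a, b] => by
      simp only [pipeA, mapCompl, fusedB]
      cases ha : complRNA a <;> cases hb : complRNA b <;> simp [codonsA]
  | a :: b :: c :: r => by
      have ih := pipeA_eq_fusedB r
      simp only [pipeA] at ih ⊢
      cases ha : complRNA a with
      | none =>
        have hda : dig a = none := (dig_none_iff a).mpr ha
        cases hdb : dig b <;> cases hdc : dig c <;>
          simp [mapCompl, fusedB, ha, hda, hdb, hdc]
      | some x =>
        obtain ⟨dx, hdx, hx⟩ := compl_dig a x ha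
        cases hb : complRNA b with
        | none =>
          simp only [mapCompl, fusedB, ha, hb, hdx, (dig_none_iff b).2 hb]
          cases mapCompl r <;> rfl
        | some y =>
          obtain ⟨dy, hdy, hy⟩ := compl_dig b y hb
          cases hc : complRNA c with
          | none =>
            simp only [mapCompl, fusedB, ha, hb, hc, hdx, hdy, (dig_none_iff c).2 hc]
            cases mapCompl r <;> rfl
          | some z =>
            obtain ⟨dz, hdz, hz⟩ := compl_dig c z hc
            simp only [mapCompl, fusedB, ha, hb, hc, hdx, hdy, hdz]
            cases hm : mapCompl r with
            | none =>
              rw [hm, Option.bind_none] at ih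
              rw [← ih]
              rfl
            | some m =>
              rw [hm, Option.bind_some] at ih
              simp only [codonsA]
              cases hcs : codonsA m with
              | none =>
                rw [hcs, Option.bind_none] at ih
                rw [← ih]
                simp [codonsA, hcs]
              | some cs =>
                rw [hcs, Option.bind_some] at ih
                simp only [codonsA, hcs, Option.bind_some, mapCode,
                  gencode_table x y z dx dy dz hx hy hz, ← ih]
                cases mapCode cs <;> rfl

theorem ports_agree (seq : String) : prot_cod seq = prot_cod_alt seq := by
  have h := pipeA_eq_fusedB seq.toList
  simp only [pipeA] at h
  simp only [prot_cod, prot_cod_alt, ← h]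
  cases hm : mapCompl seq.toList with
  | none => rfl
  | some m =>
    simp only [Option.bind_some]
    cases hcs : codonsA m with
    | none => rfl
    | some cs =>
      cases hps : mapCode cs <;> simp [Option.bind_some, hps]

-- ===== VERDICT =====
theorem prot_cod_spec : Claim_equal_prot_cod := by
  intro seq _ _
  unfold Spec_prot_cod
  exact ports_agree seq
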